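-- pv_equiv track=rewrite | github.com/pxbao-itus/Learning-Path-Recommendation-System | algorithm_implementation/finding_set_courses_step2.py | is_inside_list_lo_existed
-- ===== SOURCE A (Python) =====
-- def is_inside_list_lo_existed(lo_dict, user_lo_require, user_lo_current_require):
--     for set_lo in user_lo_require:
--         for lo in set_lo:
--             if lo.get('id') == lo_dict.get('id') \
--                     and lo.get('level') is not None \
--                     and lo_dict.get('level') is not None \
--                     and lo.get('level') >= lo_dict.get('level'):
--                 return True
--             else:
--                 continue
--     for lo in user_lo_current_require:
--         if lo.get('id') == lo_dict.get('id') \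
--                 and lo.get('level') is not None \
--                 and lo_dict.get('level') is not None \
--                 and lo.get('level') >= lo_dict.get('level'):
--             return True
--         else:
--             continue
--     return False
-- ===== SOURCE B (Python) =====
-- def is_inside_list_lo_existed(lo_dict, user_lo_require, user_lo_current_require):
--     target_level = lo_dict.get('level')
--     if target_level is None:
--         return False
--     target_id = lo_dict.get('id')
--     candidates = [lo.get('level')
--                   for group in list(user_lo_require) + [user_lo_current_require]
--                   for lo in group
--                   if lo.get('id') == target_id and lo.get('level') is not None]
--     return bool(candidates) and max(candidates) >= target_level
-- ===== Notes on version B (the rewrite author's own statement) =====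
-- stated objective: simpler
-- what changed: Replaces the two early-return scan loops by one comprehension collecting all matching non-None levels and a single aggregate test max(candidates) >= target.
import Mathlib
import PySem

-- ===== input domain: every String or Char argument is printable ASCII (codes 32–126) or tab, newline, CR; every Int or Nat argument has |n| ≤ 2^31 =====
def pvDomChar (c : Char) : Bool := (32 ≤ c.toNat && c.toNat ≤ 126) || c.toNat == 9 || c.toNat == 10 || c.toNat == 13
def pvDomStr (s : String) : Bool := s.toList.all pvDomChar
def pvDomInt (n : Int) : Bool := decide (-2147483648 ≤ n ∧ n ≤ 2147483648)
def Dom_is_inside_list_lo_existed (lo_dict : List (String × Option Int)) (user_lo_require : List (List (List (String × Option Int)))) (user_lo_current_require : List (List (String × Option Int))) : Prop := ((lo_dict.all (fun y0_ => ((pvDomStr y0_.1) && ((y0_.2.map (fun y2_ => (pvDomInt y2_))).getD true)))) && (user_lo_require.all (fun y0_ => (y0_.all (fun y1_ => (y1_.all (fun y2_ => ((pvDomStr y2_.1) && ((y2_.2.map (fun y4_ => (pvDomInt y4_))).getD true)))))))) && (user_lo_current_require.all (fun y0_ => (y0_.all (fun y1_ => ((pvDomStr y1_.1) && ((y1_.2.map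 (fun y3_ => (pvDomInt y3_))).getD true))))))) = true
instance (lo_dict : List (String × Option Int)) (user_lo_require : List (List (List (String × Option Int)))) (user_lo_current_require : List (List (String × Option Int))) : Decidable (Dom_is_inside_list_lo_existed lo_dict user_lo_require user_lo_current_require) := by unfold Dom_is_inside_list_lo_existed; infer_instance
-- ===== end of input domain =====

-- B replaces A's two early-return scans by one candidate collection + a single max >= target test (objective: simpler).
-- ===== PORT A =====
-- dict.get(k) on a dict[str, Optional[int]]: first-match lookup, missing key and stored None both give none (exact)
def pvGet (d : List (String × Option Int)) (k : String) : Option Int :=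
  (d.lookup k).join

-- the if-condition of A's loops, verbatim (short-circuit 'and' chain)
def pvCond (lo_dict lo : List (String × Option Int)) : Bool :=
  (pvGet lo "id" == pvGet lo_dict "id") &&
  (match pvGet lo "level", pvGet lo_dict "level" with
   | some a, some b => decide (a ≥ b)
   | _, _ => false)

def is_inside_list_lo_existed (lo_dict : List (String × Option Int)) (user_lo_require : List (List (List (String × Option Int)))) (user_lo_current_require : List (List (String × Option Int))) : Bool :=
  -- first nested loop with early 'return True', then the second loop, then 'return False'
  (user_lo_require.any (fun set_lo => set_lo.any (fun lo => pvCond lo_dict lo))) ||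
  (user_lo_current_require.any (fun lo => pvCond lo_dict lo))

-- ===== PORT B =====
def is_inside_list_lo_existed_alt (lo_dict : List (String × Option Int)) (user_lo_require : List (List (List (String × Option Int)))) (user_lo_current_require : List (List (String × Option Int))) : Bool :=
  match pvGet lo_dict "level" with
  | none => false
  | some target =>
    let tid := pvGet lo_dict "id"
    let candidates := ((user_lo_require ++ [user_lo_current_require]).flatMap (fun g => g)).filterMap
      (fun lo => if pvGet lo "id" == tid then pvGet lo "level" else none)
    match PySem.List.max? candidates (fun x => x) with
    | some m => decide (m ≥ target)
    | none => false

-- ===== PRECONDITION & SPEC =====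
def Spec_is_inside_list_lo_existed (lo_dict : List (String × Option Int)) (user_lo_require : List (List (List (String × Option Int)))) (user_lo_current_require : List (List (String × Option Int))) (out : Bool) : Prop := out = is_inside_list_lo_existed_alt lo_dict user_lo_require user_lo_current_require
instance (lo_dict : List (String × Option Int)) (user_lo_require : List (List (List (String × Option Int)))) (user_lo_current_require : List (List (String × Option Int))) (out : Bool) : Decidable (Spec_is_inside_list_lo_existed lo_dict user_lo_require user_lo_current_require out) := by unfold Spec_is_inside_list_lo_existed; infer_instance

-- ===== CLAIM (what is proved, stated in full; the proofs are below) =====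
def Claim_equal_is_inside_list_lo_existed : Prop := ∀ (lo_dict : List (String × Option Int)) (user_lo_require : List (List (List (String × Option Int)))) (user_lo_current_require : List (List (String × Option Int))), Dom_is_inside_list_lo_existed lo_dict user_lo_require user_lo_current_require → Spec_is_inside_list_lo_existed lo_dict user_lo_require user_lo_current_require (is_inside_list_lo_existed lo_dict user_lo_require user_lo_current_require)

-- ===== LEMMAS AND PROOFS =====

-- max(candidates) >= t succeeds iff some candidate is >= t
theorem pv_max_test (c : List Int) (t : Int) :
    (match PySem.List.max? c (fun x => x) with
     | some m => decide (m ≥ t)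
     | none => false) = c.any (fun x => decide (t ≤ x)) := by
  cases h : PySem.List.max? c (fun x => x) with
  | none =>
    have : c = [] := (PySem.List.max?_eq_none_iff _ _).mp h
    subst this; simp
  | some m =>
    have hm : m ∈ c := PySem.List.max?_mem h
    have hmax := PySem.List.max?_isMax h
    by_cases hge : t ≤ m
    · simp only [ge_iff_le, decide_eq_true hge]
      exact (List.any_eq_true.mpr ⟨m, hm, by simpa using hge⟩).symm
    · simp only [ge_iff_le, decide_eq_false hge]
      symm
      simp only [List.any_eq_false]
      intro x hx
      have := hmax x hx
      simp only [decide_eq_true_eq]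
      omega

-- per-element agreement: B's comprehension keeps exactly A's matching condition
theorem pv_elem (lo_dict lo : List (String × Option Int)) (t : Int)
    (hlv : pvGet lo_dict "level" = some t) :
    ((if pvGet lo "id" == pvGet lo_dict "id" then pvGet lo "level" else none).any
      (fun x => decide (t ≤ x))) = pvCond lo_dict lo := by
  unfold pvCond
  rw [hlv]
  by_cases hid : pvGet lo "id" == pvGet lo_dict "id"
  · rw [if_pos hid, hid]
    cases pvGet lo "level" with
    | none => simp
    | some a => simp [ge_iff_le]
  · rw [if_neg hid]
    simp only [Bool.not_eq_true] at hid
    simp [hid]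

-- ===== VERDICT (by name: the statement is the Claim_ definition above) =====
theorem is_inside_list_lo_existed_spec : Claim_equal_is_inside_list_lo_existed := by
  intro lo_dict ur ucr _
  unfold Spec_is_inside_list_lo_existed is_inside_list_lo_existed is_inside_list_lo_existed_alt
  cases hlv : pvGet lo_dict "level" with
  | none =>
    simp only [pvCond, hlv]
    simp
  | some t =>
    dsimp only
    rw [pv_max_test]
    simp only [List.any_filterMap, List.any_flatMap, List.any_append, List.any_cons,
      List.any_nil, Bool.or_false]
    exact congrArg₂ (fun x y => x || y)
      (List.any_congr rfl (fun g => List.any_congr rfl (fun lo => (pv_elem lo_dict lo t hlv).symm)))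
      (List.any_congr rfl (fun lo => (pv_elem lo_dict lo t hlv).symm))
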